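-- pv_equiv track=rewrite | github.com/mikan77/pyDatabase | src/uspexdb/legacy/uspexdb_v2.py | _merge_atomic_number_requirements
-- ===== SOURCE A (Python) =====
-- from collections import Counter
-- from typing import Any, Callable, Dict, Iterable, List, Optional, Sequence, Set, Tuple, Union
--
-- def _merge_atomic_number_requirements(
--     requirements_a: Sequence[Tuple[int, int]],
--     requirements_b: Sequence[Tuple[int, int]],
-- ) -> Tuple[Tuple[int, int], ...]:
--     merged: Counter[int] = Counter()
--     for atomic_number, count in requirements_a:
--         merged[int(atomic_number)] += int(count)
--     for atomic_number, count in requirements_b: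
--         merged[int(atomic_number)] += int(count)
--     return tuple(sorted((int(atomic_number), int(count)) for atomic_number, count in merged.items()))
-- ===== SOURCE B (Python) =====
-- def _merge_atomic_number_requirements(requirements_a, requirements_b):
--     combined = sorted(
--         [(int(an), int(count)) for an, count in requirements_a]
--         + [(int(an), int(count)) for an, count in requirements_b],
--         key=lambda pair: pair[0],
--     )
--     merged = []
--     i = 0
--     n = len(combined)
--     while i < n:
--         atomic_number, total = combined[i]
--         i += 1
--         while i < n and combined[i][0] == atomic_number:
--             total += combined[i][1]
--             i += 1
--         merged.append((atomic_number, total))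
--     return tuple(merged)
-- ===== Notes on version B (the rewrite author's own statement) =====
-- stated objective: alternative
-- what changed: Replaces A's Counter/dict aggregation followed by a tuple sort with a sort of the concatenated pair list by atomic number followed by a single grouping pass that sums each run of equal atomic numbers.
import Mathlib
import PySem

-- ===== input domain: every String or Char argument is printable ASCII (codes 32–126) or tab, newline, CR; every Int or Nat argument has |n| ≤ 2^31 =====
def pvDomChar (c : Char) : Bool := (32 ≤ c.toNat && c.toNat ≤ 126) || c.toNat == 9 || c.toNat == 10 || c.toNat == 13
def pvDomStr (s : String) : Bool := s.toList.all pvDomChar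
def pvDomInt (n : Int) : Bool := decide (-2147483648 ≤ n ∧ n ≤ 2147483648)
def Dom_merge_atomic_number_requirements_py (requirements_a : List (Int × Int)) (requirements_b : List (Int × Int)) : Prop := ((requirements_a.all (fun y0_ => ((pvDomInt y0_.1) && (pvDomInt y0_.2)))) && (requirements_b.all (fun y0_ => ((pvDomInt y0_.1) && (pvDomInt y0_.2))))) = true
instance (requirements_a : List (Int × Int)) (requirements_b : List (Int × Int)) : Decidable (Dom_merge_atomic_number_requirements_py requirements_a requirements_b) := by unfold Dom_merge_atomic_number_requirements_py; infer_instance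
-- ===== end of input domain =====

-- B replaces A's Counter aggregation by "sort the concatenation by atomic number, then one grouping pass
-- summing each run" (alternative decomposition, same O(n log n) cost); return-value equivalence only.

-- ===== PORT A =====
-- Counter loop: merged[int(an)] += int(count)  (int() is the identity on Int inputs)
def merge_atomic_number_requirements_py (requirements_a : List (Int × Int)) (requirements_b : List (Int × Int)) : List (Int × Int) :=
  let merged : PySem.Dict Int Int := PySem.Dict.empty
  let merged := requirements_a.foldl (fun d p => d.modify p.1 0 (· + p.2)) merged
  let merged := requirements_b.foldl (fun d p => d.modify p.1 0 (· + p.2)) merged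
  -- sorted((int(an), int(count)) for an, count in merged.items()): tuple sort → sorted2
  PySem.List.sorted2 (merged.items.map (fun p => (p.1, p.2))) Prod.fst Prod.snd

-- ===== PORT B =====
-- outer/inner while over the sorted list: one run of equal atomic numbers per outer step
def pvGroupRuns : List (Int × Int) → List (Int × Int)
  | [] => []
  | (an, c) :: rest =>
    let run := rest.takeWhile (fun p => p.1 == an)
    (an, c + (run.map Prod.snd).sum) :: pvGroupRuns (rest.dropWhile (fun p => p.1 == an))
termination_by l => l.length
decreasing_by
  simp only [List.length_cons]
  exact Nat.lt_succ_of_le (List.length_dropWhile_le _ _)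

def merge_atomic_number_requirements_py_alt (requirements_a : List (Int × Int)) (requirements_b : List (Int × Int)) : List (Int × Int) :=
  let combined := PySem.List.sorted
    (requirements_a.map (fun p => (p.1, p.2)) ++ requirements_b.map (fun p => (p.1, p.2)))
    Prod.fst
  pvGroupRuns combined

-- ===== PRECONDITION & SPEC =====
def Spec_merge_atomic_number_requirements_py (requirements_a : List (Int × Int)) (requirements_b : List (Int × Int)) (out : List (Int × Int)) : Prop := out = merge_atomic_number_requirements_py_alt requirements_a requirements_b
instance (requirements_a : List (Int × Int)) (requirements_b : List (Int × Int)) (out : List (Int × Int)) : Decidable (Spec_merge_atomic_number_requirements_py requirements_a requirements_b out) := by unfold Spec_merge_atomic_number_requirements_py; infer_instance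

-- ===== CLAIM (what is proved, stated in full; the proofs are below) =====
def Claim_equal_merge_atomic_number_requirements_py : Prop := ∀ (requirements_a : List (Int × Int)) (requirements_b : List (Int × Int)), Dom_merge_atomic_number_requirements_py requirements_a requirements_b → Spec_merge_atomic_number_requirements_py requirements_a requirements_b (merge_atomic_number_requirements_py requirements_a requirements_b)

-- ===== LEMMAS AND PROOFS =====

-- weighted-sum of the values attached to key k in l
def pvW (l : List (Int × Int)) (k : Int) : Int :=
  ((l.filter (fun p => p.1 == k)).map Prod.snd).sum

lemma pvGetD_fold (l : List (Int × Int)) (d : PySem.Dict Int Int) (k : Int) :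
    (l.foldl (fun d p => d.modify p.1 0 (· + p.2)) d).getD k 0 = d.getD k 0 + pvW l k := by
  induction l generalizing d with
  | nil => simp [pvW]
  | cons p t ih =>
    simp only [List.foldl_cons, ih, pvW, List.filter_cons]
    rw [PySem.Dict.getD_modify]
    by_cases h : k = p.1
    · simp [h]; ring
    · have : (p.1 == k) = false := by simp [Ne.symm h]
      simp [h, this]

-- insertBy with two comparators that agree against every element of acc
lemma pvInsertBy_congr (bf bf' : (Int × Int) → (Int × Int) → Bool) (x : Int × Int)
    (acc : List (Int × Int)) (h : ∀ y ∈ acc, bf x y = bf' x y) :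
    PySem.List.insertBy bf x acc = PySem.List.insertBy bf' x acc := by
  induction acc with
  | nil => rfl
  | cons y ys ih =>
    simp only [PySem.List.insertBy]
    rw [h y List.mem_cons_self]
    by_cases hb : bf' x y = true
    · simp [hb]
    · simp only [if_neg hb]
      rw [ih (fun z hz => h z (List.mem_cons_of_mem _ hz))]

-- A list whose fst-keys are all distinct is sorted the same by the tuple key and by the fst key alone.
lemma pvFold_insertBy_congr (l acc : List (Int × Int))
    (h : ((acc ++ l).map Prod.fst).Nodup) :
    l.foldl (fun acc x => PySem.List.insertBy
      (fun a b => decide (a.1 < b.1) || (!decide (b.1 < a.1) && decide (a.2 < b.2))) x acc) acc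
    = l.foldl (fun acc x => PySem.List.insertBy (fun a b => decide (a.1 < b.1)) x acc) acc := by
  induction l generalizing acc with
  | nil => rfl
  | cons x t ih =>
    have hx : ∀ y ∈ acc, x.1 ≠ y.1 := by
      intro y hy he
      have h' : (acc.map Prod.fst ++ (x.1 :: t.map Prod.fst)).Nodup := by simpa using h
      have hdisj := (List.nodup_append.mp h').2.2
      exact hdisj y.1 (List.mem_map_of_mem hy) x.1 List.mem_cons_self he.symm
    have hins : PySem.List.insertBy
        (fun a b => decide (a.1 < b.1) || (!decide (b.1 < a.1) && decide (a.2 < b.2))) x acc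
        = PySem.List.insertBy (fun a b => decide (a.1 < b.1)) x acc := by
      apply pvInsertBy_congr
      intro y hy
      rcases lt_trichotomy x.1 y.1 with hlt | heq | hgt
      · simp [hlt, not_lt.mpr (le_of_lt hlt)]
      · exact absurd heq (hx y hy)
      · simp [hgt, not_lt.mpr (le_of_lt hgt)]
    simp only [List.foldl_cons, hins]
    apply ih
    have hperm0 : (PySem.List.insertBy (fun a b => decide (a.1 < b.1)) x acc ++ t).Perm (acc ++ x :: t) :=
      ((PySem.List.insertBy_perm _ x acc).append_right t).trans List.perm_middle.symm
    exact ((hperm0.map Prod.fst).nodup_iff).mpr h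

lemma pvSorted2_eq_sorted (xs : List (Int × Int)) (h : (xs.map Prod.fst).Nodup) :
    PySem.List.sorted2 xs Prod.fst Prod.snd = PySem.List.sorted xs Prod.fst := by
  simpa [PySem.List.sorted2, PySem.List.sorted] using pvFold_insertBy_congr xs [] (by simpa using h)

-- Set.ofList over "k, then a run of k's, then keys avoiding k"
lemma pvOfList_run (k : Int) (tk dk : List Int) (ht : ∀ x ∈ tk, x = k) (hd : k ∉ dk) :
    PySem.Set.ofList (k :: (tk ++ dk)) = k :: PySem.Set.ofList dk := by
  induction tk with
  | nil =>
    rw [List.nil_append, PySem.Set.ofList_cons]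
    congr 1
    simp only [PySem.Set.discard]
    apply List.filter_eq_self.mpr
    intro a ha
    have hadk : a ∈ dk := (PySem.Set.mem_ofList dk a).mp ha
    simp only [Bool.not_eq_eq_eq_not, Bool.not_true, beq_eq_false_iff_ne, ne_eq]
    exact fun he => hd (he ▸ hadk)
  | cons y t ih =>
    have hy : y = k := ht y List.mem_cons_self
    subst hy
    have ih' := ih (fun z hz => ht z (List.mem_cons_of_mem _ hz))
    rw [show (y :: t) ++ dk = y :: (t ++ dk) from rfl]
    rw [PySem.Set.ofList_cons, PySem.Set.ofList_cons]
    rw [PySem.Set.ofList_cons] at ih'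
    have hdd : PySem.Set.discard (y :: (PySem.Set.ofList (t ++ dk)).discard y) y
        = (PySem.Set.ofList (t ++ dk)).discard y := by
      simp [PySem.Set.discard, List.filter_filter]
    rw [hdd]
    exact ih' 

-- every element surviving the dropWhile of the an-run has key strictly above an
lemma pvDropWhile_gt (an : Int) (rest : List (Int × Int))
    (hle : ∀ p ∈ rest, an ≤ p.1) (hrest : rest.Pairwise (fun p q => p.1 ≤ q.1)) :
    ∀ p ∈ rest.dropWhile (fun p => p.1 == an), an < p.1 := by
  intro p' hp'
  obtain ⟨q', d', hdd⟩ : ∃ q' d', rest.dropWhile (fun p => p.1 == an) = q' :: d' := by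
    cases hcase : rest.dropWhile (fun p => p.1 == an) with
    | nil => rw [hcase] at hp'; simp at hp'
    | cons q' d' => exact ⟨q', d', rfl⟩
  have hqf : (q'.1 == an) = false := by
    have := List.head?_dropWhile_not (fun p => p.1 == an) rest
    rw [hdd] at this; simpa using this
  have hqr : q' ∈ rest := (List.dropWhile_sublist _).mem (hdd ▸ List.mem_cons_self)
  have hqlt : an < q'.1 := lt_of_le_of_ne (hle q' hqr) (Ne.symm (by simpa using hqf))
  rw [hdd] at hp'
  rcases List.mem_cons.mp hp' with rfl | hp''
  · exact hqlt
  · have hpw : (q' :: d').Pairwise (fun p q => p.1 ≤ q.1) :=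
      hdd ▸ List.Pairwise.sublist (List.dropWhile_sublist _) hrest
    exact lt_of_lt_of_le hqlt ((List.pairwise_cons.mp hpw).1 p' hp'')

-- key of every produced pair comes from the input
lemma pvGroupRuns_key_mem (cs : List (Int × Int)) (q : Int × Int) (hq : q ∈ pvGroupRuns cs) :
    q.1 ∈ cs.map Prod.fst := by
  induction cs using pvGroupRuns.induct with
  | case1 => simp [pvGroupRuns] at hq
  | case2 an c rest ih =>
    rw [pvGroupRuns] at hq
    rcases List.mem_cons.mp hq with h | h
    · simp [h]
    · have := ih h
      have hsub := (List.dropWhile_sublist (fun p => p.1 == an) (l := rest)).map Prod.fst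
      simp only [List.map_cons, List.mem_cons]
      exact Or.inr (hsub.mem this)

-- main characterization of the grouping pass on a key-sorted list
lemma pvGroupRuns_sorted (cs : List (Int × Int)) (h : cs.Pairwise (fun p q => p.1 ≤ q.1)) :
    pvGroupRuns cs = (PySem.Set.ofList (cs.map Prod.fst)).map (fun k => (k, pvW cs k)) := by
  induction cs using pvGroupRuns.induct with
  | case1 => simp [pvGroupRuns]
  | case2 an c rest ih =>
    have hle : ∀ p ∈ rest, an ≤ p.1 := by
      intro p hp; exact (List.pairwise_cons.mp h).1 p hp
    have hrest : rest.Pairwise (fun p q => p.1 ≤ q.1) := (List.pairwise_cons.mp h).2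
    set t := rest.takeWhile (fun p => p.1 == an) with htdef
    set dd := rest.dropWhile (fun p => p.1 == an) with hddef
    have htd : t ++ dd = rest := List.takeWhile_append_dropWhile
    have ht : ∀ p ∈ t, p.1 = an := by
      intro p hp; simpa using List.mem_takeWhile_imp hp
    have hd : ∀ p ∈ dd, an < p.1 := hddef ▸ pvDropWhile_gt an rest hle hrest
    have hdk : an ∉ dd.map Prod.fst := by
      intro hmem
      rcases List.mem_map.mp hmem with ⟨p, hp, hpk⟩
      exact absurd (hpk ▸ hd p hp) (lt_irrefl an)
    have hddpw : dd.Pairwise (fun p q => p.1 ≤ q.1) := List.Pairwise.sublist (List.dropWhile_sublist _) hrest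
    rw [pvGroupRuns]
    rw [← htdef, ← hddef, ih hddpw]
    have hkeys : ((an, c) :: rest).map Prod.fst = an :: (t.map Prod.fst ++ dd.map Prod.fst) := by
      simp [← htd]
    rw [hkeys, pvOfList_run an (t.map Prod.fst) (dd.map Prod.fst)
      (by intro x hx; rcases List.mem_map.mp hx with ⟨p, hp, hpk⟩; exact hpk ▸ ht p hp) hdk]
    rw [List.map_cons]
    congr 1
    · -- head: pvW cs an = c + run sum
      have hfilt : (((an, c) :: rest).filter (fun p => p.1 == an)) = (an, c) :: t := by
        rw [List.filter_cons, if_pos (by simp)]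
        congr 1
        rw [← htd, List.filter_append]
        have h1 : t.filter (fun p => p.1 == an) = t :=
          List.filter_eq_self.mpr (fun p hp => by simp [ht p hp])
        have h2 : dd.filter (fun p => p.1 == an) = [] :=
          List.filter_eq_nil_iff.mpr (fun p hp => by simp [ne_of_gt (hd p hp)])
        rw [h1, h2, List.append_nil]
      simp [pvW, hfilt]
    · -- tail: the weight of each later key is unchanged by dropping the an-run
      apply List.map_congr_left
      intro k hk
      have hkd : k ∈ dd.map Prod.fst := (PySem.Set.mem_ofList _ _).mp hk
      have hkan : k ≠ an := fun he => hdk (he ▸ hkd)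
      have : pvW ((an, c) :: rest) k = pvW dd k := by
        simp only [pvW, List.filter_cons]
        rw [if_neg (by simp [Ne.symm hkan])]
        rw [← htd, List.filter_append]
        have h1 : t.filter (fun p => p.1 == k) = [] :=
          List.filter_eq_nil_iff.mpr (fun p hp => by simp [ht p hp, Ne.symm hkan])
        rw [h1, List.nil_append]
      rw [this]

lemma pvGroupRuns_pairwise (cs : List (Int × Int)) (h : cs.Pairwise (fun p q => p.1 ≤ q.1)) :
    (pvGroupRuns cs).Pairwise (fun p q => p.1 < q.1) := by
  induction cs using pvGroupRuns.induct with
  | case1 => simp [pvGroupRuns]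
  | case2 an c rest ih =>
    have hle : ∀ p ∈ rest, an ≤ p.1 := fun p hp => (List.pairwise_cons.mp h).1 p hp
    have hrest : rest.Pairwise (fun p q => p.1 ≤ q.1) := (List.pairwise_cons.mp h).2
    have hddpw : (rest.dropWhile (fun p => p.1 == an)).Pairwise (fun p q => p.1 ≤ q.1) :=
      List.Pairwise.sublist (List.dropWhile_sublist _) hrest
    rw [pvGroupRuns]
    apply List.pairwise_cons.mpr
    refine ⟨?_, ih hddpw⟩
    intro q hq
    have hk := pvGroupRuns_key_mem _ q hq
    rcases List.mem_map.mp hk with ⟨p, hp, hpk⟩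
    have hd : ∀ p' ∈ rest.dropWhile (fun p => p.1 == an), an < p'.1 :=
      pvDropWhile_gt an rest hle hrest
    exact hpk ▸ hd p hp

-- ===== VERDICT (by name: the statement is the Claim_ definition above) =====
theorem merge_atomic_number_requirements_py_spec : Claim_equal_merge_atomic_number_requirements_py := by
  intro a b _
  unfold Spec_merge_atomic_number_requirements_py
  unfold merge_atomic_number_requirements_py merge_atomic_number_requirements_py_alt
  simp only [Prod.mk.eta, List.map_id']
  set L := a ++ b with hL
  -- A side: the counter is one fold over L, its items are keys paired with weights
  rw [← List.foldl_append]
  set d := L.foldl (fun d p => d.modify p.1 0 (· + p.2)) PySem.Dict.empty with hd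
  have hnd : d.keys.Nodup := by
    exact PySem.Dict.nodup_keys_foldl_modify_key L Prod.fst 0 (fun _ p v => v + p.2) PySem.Dict.empty
      (by simp [PySem.Dict.keys_empty])
  have hkeys : d.keys = PySem.Set.ofList (L.map Prod.fst) := by
    rw [hd, PySem.Dict.keys_foldl_modify_key L Prod.fst 0 (fun _ p v => v + p.2) PySem.Dict.empty]
    rfl
  have hitems : d.items = (PySem.Set.ofList (L.map Prod.fst)).map (fun k => (k, pvW L k)) := by
    rw [PySem.Dict.items_eq_map_keys d hnd 0, hkeys]
    apply List.map_congr_left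
    intro k _
    rw [hd, pvGetD_fold]
    simp [PySem.Dict.getD_empty]
  -- B side: the grouping pass equals the sorted distinct keys paired with the same weights
  set cs := PySem.List.sorted L Prod.fst with hcs
  have hcp : cs.Perm L := PySem.List.sorted_perm L Prod.fst false
  have hcsort : cs.Pairwise (fun p q => p.1 ≤ q.1) := PySem.List.sorted_pairwise L Prod.fst
  have hWeq : ∀ k, pvW cs k = pvW L k := by
    intro k
    exact ((hcp.filter _).map Prod.snd).sum_eq
  have hBG : pvGroupRuns cs = (PySem.Set.ofList (cs.map Prod.fst)).map (fun k => (k, pvW L k)) := by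
    rw [pvGroupRuns_sorted cs hcsort]
    exact List.map_congr_left (fun k _ => by rw [hWeq k])
  -- the two key sets are permutations of one another
  have hMperm : (PySem.Set.ofList (cs.map Prod.fst)).Perm (PySem.Set.ofList (L.map Prod.fst)) := by
    apply (List.perm_ext_iff_of_nodup (PySem.Set.nodup_ofList _) (PySem.Set.nodup_ofList _)).mpr
    intro k
    rw [PySem.Set.mem_ofList, PySem.Set.mem_ofList]
    exact ⟨fun hk => (hcp.map Prod.fst).mem_iff.mp hk, fun hk => (hcp.map Prod.fst).mem_iff.mpr hk⟩
  have hperm : (pvGroupRuns cs).Perm d.items := by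
    rw [hBG, hitems]
    exact hMperm.map _
  have hpw : (pvGroupRuns cs).Pairwise (fun p q => p.1 < q.1) := pvGroupRuns_pairwise cs hcsort
  -- assemble
  have hnodupfst : (d.items.map Prod.fst).Nodup := by
    have : d.items.map Prod.fst = d.keys := rfl
    rw [this]; exact hnd
  rw [pvSorted2_eq_sorted d.items hnodupfst]
  exact PySem.List.sorted_eq_of_perm_of_pairwise_lt d.items (pvGroupRuns cs) Prod.fst hperm hpw
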